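-- pv_equiv track=rewrite | github.com/xiaofanc/leetcode | CodeSignal/20230413/clear-obstacle-puzzle-game.py | clear_obstacles_puzzle
-- ===== SOURCE A (Python) =====
-- def clear_obstacles_puzzle(board):
-- 	m, n = len(board), len(board[0])
--
-- 	# get the least step to reach to bottom for the figure
-- 	step = m
-- 	for i in range(m-1,-1,-1):
-- 		for j in range(n):
-- 			if board[i][j] == '*':
-- 				step = m-1-i
-- 				break # j
-- 		if step < m:
-- 			break # i
--
-- 	# if already touch the bottom or no obstacles
-- 	if step == 0 or step == m:
-- 		return 0
--
-- 	# move figure step by step and calculate the obstacles on the way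
-- 	cols = [[] for i in range(n)]
-- 	for i in range(m):
-- 		for j in range(n):
-- 			if board[i][j] == '*':
-- 				cols[j].append(i)
-- 	res = 0
-- 	for j, col in enumerate(cols):
-- 		if col: # there is part of figure in column j
-- 			top, bottom = min(col), max(col)
-- 			for i in range(top, bottom+step+1):
-- 				if board[i][j] == '#':
-- 					res += 1
-- 	return res
-- ===== SOURCE B (Python) =====
-- def clear_obstacles_puzzle(board):
--     # Prefix-sum re-implementation: per-column '#' prefix counts answer each
--     # column's obstacle range in O(1) instead of rescanning the row interval.
--     m, n = len(board), len(board[0])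
--     # star rows per column, column-major (each list is ascending)
--     stars = [[i for i in range(m) if board[i][j] == '*'] for j in range(n)]
--     low = max((col[-1] for col in stars if col), default=-1)
--     if low < 0 or low == m - 1:
--         return 0
--     step = m - 1 - low
--     # pref[i][j] = number of '#' among rows 0..i-1 of column j
--     pref = [[0] * n]
--     for row in board:
--         last = pref[-1]
--         pref.append([last[j] + (row[j] == '#') for j in range(n)])
--     return sum(pref[col[-1] + step + 1][j] - pref[col[0]][j]
--                for j, col in enumerate(stars) if col)
-- ===== Notes on version B (the rewrite author's own statement) =====
-- stated objective: alternative
-- what changed: Replaces A's bottom-up break scan, row-major cols-building and per-column rescan of the row interval by a column-major star-row table plus a per-column '#' prefix-sum table, so each column's obstacle count is a single subtraction of two prefix entries.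
-- outside the precondition, e.g. on clear_obstacles_puzzle(['ab', '*']): A returns 0, B raises IndexError
import Mathlib
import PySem

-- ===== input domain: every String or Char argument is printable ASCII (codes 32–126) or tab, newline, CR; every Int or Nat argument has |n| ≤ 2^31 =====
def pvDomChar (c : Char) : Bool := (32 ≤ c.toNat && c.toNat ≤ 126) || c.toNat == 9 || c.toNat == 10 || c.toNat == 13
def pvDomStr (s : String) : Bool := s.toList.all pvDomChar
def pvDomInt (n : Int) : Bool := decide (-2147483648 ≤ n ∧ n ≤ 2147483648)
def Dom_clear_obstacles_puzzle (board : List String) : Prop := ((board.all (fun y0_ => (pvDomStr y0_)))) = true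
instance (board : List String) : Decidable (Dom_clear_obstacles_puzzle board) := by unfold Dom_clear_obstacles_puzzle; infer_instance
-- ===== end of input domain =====

-- B replaces A's bottom-up break scan, row-major cols-building and per-column rescan of the
-- row interval by a column-major star table plus per-column '#' prefix sums (objective: alternative).

-- board[i][j], total version (inside Pre_ every access the Pythons perform is in range)
def pvCell (board : List String) (i j : Nat) : Char :=
  ((board.getD i "").toList).getD j ' '

-- ===== PORT A =====
-- inner 'for j in range(n): if board[i][j]=='*': step=...; break' — the break only sets step, so it is 'any'
def pvRowHasStar (board : List String) (n i : Nat) : Bool :=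
  (List.range n).any (fun j => pvCell board i j == '*')

-- outer 'for i in range(m-1,-1,-1): ...; if step < m: break'
def pvStepLoop (board : List String) (n m : Nat) : List Nat → Nat
  | [] => m
  | i :: rest => if pvRowHasStar board n i then m - 1 - i else pvStepLoop board n m rest

-- 'for j in range(n): if board[i][j]=='*': cols[j].append(i)'
def pvInner (board : List String) (i : Nat) (l : List Nat) (c : List (List Nat)) : List (List Nat) :=
  l.foldl (fun c j => if pvCell board i j == '*' then c.set j ((c.getD j []) ++ [i]) else c) c

def clear_obstacles_puzzle (board : List String) : Int :=
  let m := board.length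
  let n := (board.headD "").length
  let step := pvStepLoop board n m ((List.range m).reverse)
  if step = 0 ∨ step = m then 0
  else
    let cols := (List.range m).foldl (fun c i => pvInner board i (List.range n) c) (List.replicate n [])
    (PySem.List.enumerate cols 0).foldl (fun res p =>
      if p.2 ≠ [] then
        let top := (PySem.List.min? p.2 (fun x => x)).getD 0
        let bottom := (PySem.List.max? p.2 (fun x => x)).getD 0
        (List.range' top (bottom + step + 1 - top)).foldl
          (fun res i => if pvCell board i p.1.toNat == '#' then res + 1 else res) res
      else res) (0 : Int)

-- ===== PORT B =====
-- stars = [[i for i in range(m) if board[i][j] == '*'] for j in range(n)]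
def pvStars (board : List String) (m n : Nat) : List (List Nat) :=
  (List.range n).map (fun j => (List.range m).filter (fun i => pvCell board i j == '*'))

-- low = max((col[-1] for col in stars if col), default=-1)
def pvLow (stars : List (List Nat)) : Int :=
  stars.foldl (fun acc col =>
    match col.getLast? with
    | some b => max acc (b : Int)
    | none => acc) (-1)

-- pref[i][j] = number of '#' among rows 0..i-1 of column j, built by appending rows
def pvPref (board : List String) (n : Nat) : List (List Int) :=
  board.foldl (fun pref row =>
    pref ++ [(List.range n).map (fun j =>
      (pref.getLastD []).getD j 0 + (if row.toList.getD j ' ' == '#' then 1 else 0))])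
    [List.replicate n 0]

def clear_obstacles_puzzle_alt (board : List String) : Int :=
  let m := board.length
  let n := (board.headD "").length
  let stars := pvStars board m n
  let low := pvLow stars
  if low < 0 ∨ low = (m : Int) - 1 then 0
  else
    let step := m - 1 - low.toNat
    let pref := pvPref board n
    (PySem.List.enumerate stars 0).foldl (fun acc p =>
      if p.2 ≠ [] then
        acc + ((pref.getD (p.2.getLastD 0 + step + 1) []).getD p.1.toNat 0
             - (pref.getD (p.2.headD 0) []).getD p.1.toNat 0)
      else acc) (0 : Int)

-- ===== PRECONDITION & SPEC =====
-- Pre_ excludes the empty board (A raises IndexError on board[0]) and ragged boards whose later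
-- rows are shorter than the first (board[i][j] raises IndexError on every full scan; on a few
-- such boards A still returns 0 via the early break in the last row — those are excluded too,
-- B raises there).
def Pre_clear_obstacles_puzzle (board : List String) : Prop :=
  board ≠ [] ∧ ∀ s ∈ board, (board.headD "").length ≤ s.length
instance (board : List String) : Decidable (Pre_clear_obstacles_puzzle board) := by
  unfold Pre_clear_obstacles_puzzle; infer_instance
def pvWitness_clear_obstacles_puzzle : List String := ["*..", "...", "#.#"]

def Spec_clear_obstacles_puzzle (board : List String) (out : Int) : Prop := out = clear_obstacles_puzzle_alt board
instance (board : List String) (out : Int) : Decidable (Spec_clear_obstacles_puzzle board out) := by unfold Spec_clear_obstacles_puzzle; infer_instance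

-- ===== CLAIM (what is proved, stated in full; the proofs are below) =====
def Claim_equal_clear_obstacles_puzzle : Prop := ∀ (board : List String), Dom_clear_obstacles_puzzle board → Pre_clear_obstacles_puzzle board → Spec_clear_obstacles_puzzle board (clear_obstacles_puzzle board)

-- ===== LEMMAS AND PROOFS =====

-- greatest index < k satisfying p (the mathematical shape shared by A's bottom-up scan and B's max)
def pvGmax (p : Nat → Bool) : Nat → Option Nat
  | 0 => none
  | k+1 => if p k then some k else pvGmax p k

theorem pvGmax_filter (p : Nat → Bool) (k : Nat) :
    ((List.range k).filter p).getLast? = pvGmax p k := by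
  induction k with
  | zero => simp [pvGmax]
  | succ k ih =>
    rw [List.range_succ, List.filter_append]
    by_cases h : p k
    · simp [pvGmax, h]
    · simp [pvGmax, h, ih]

theorem pvGmax_none (p : Nat → Bool) (k : Nat) :
    pvGmax p k = none ↔ ∀ i < k, ¬ p i = true := by
  induction k with
  | zero => simp [pvGmax]
  | succ k ih =>
    constructor
    · intro H i hi
      by_cases hp : p k
      · simp [pvGmax, hp] at H
      · rcases Nat.lt_succ_iff_lt_or_eq.mp hi with h' | h'
        · exact (ih.mp (by simpa [pvGmax, hp] using H)) i h'
        · subst h'; simp [hp]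
    · intro H
      have hp : ¬ p k = true := H k (Nat.lt_succ_self k)
      rw [show pvGmax p (k+1) = pvGmax p k by simp [pvGmax, hp]]
      exact ih.mpr (fun i hi => H i (Nat.lt_succ_of_lt hi))

theorem pvGmax_some_mem (p : Nat → Bool) (k i : Nat) (h : pvGmax p k = some i) :
    p i = true ∧ i < k := by
  induction k with
  | zero => simp [pvGmax] at h
  | succ k ih =>
    by_cases hp : p k
    · simp [pvGmax, hp] at h; subst h; exact ⟨hp, Nat.lt_succ_self k⟩
    · simp [pvGmax, hp] at h
      rcases ih h with ⟨h1, h2⟩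
      exact ⟨h1, Nat.lt_succ_of_lt h2⟩

theorem pvGmax_some_ub (p : Nat → Bool) (k i : Nat) (h : pvGmax p k = some i) :
    ∀ i', i' < k → p i' = true → i' ≤ i := by
  induction k with
  | zero => simp [pvGmax] at h
  | succ k ih =>
    by_cases hp : p k
    · simp [pvGmax, hp] at h; subst h
      intro i' hi' _; omega
    · simp [pvGmax, hp] at h
      intro i' hi' hpi'
      rcases Nat.lt_succ_iff_lt_or_eq.mp hi' with h' | h'
      · exact ih h i' h' hpi'
      · subst h'; simp [hpi'] at hp

-- A's step-finding loop on range(m-1,-1,-1)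
theorem pvStepLoop_range (board : List String) (n m k : Nat) :
    pvStepLoop board n m ((List.range k).reverse) =
      (match pvGmax (fun i => pvRowHasStar board n i) k with
       | some i => m - 1 - i
       | none => m) := by
  induction k with
  | zero => simp [pvStepLoop, pvGmax]
  | succ k ih =>
    rw [List.range_succ, List.reverse_append, List.reverse_singleton, List.singleton_append]
    show (if pvRowHasStar board n k then m - 1 - k else pvStepLoop board n m (List.range k).reverse) = _
    by_cases h : pvRowHasStar board n k
    · simp [h, pvGmax]
    · have hgg : pvGmax (fun i => pvRowHasStar board n i) (k+1) = pvGmax (fun i => pvRowHasStar board n i) k := by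
        simp [pvGmax, h]
      rw [hgg, if_neg h, ih]

-- the inner cols loop, pointwise
theorem pvInner_length (board : List String) (i : Nat) (l : List Nat) (c : List (List Nat)) :
    (pvInner board i l c).length = c.length := by
  induction l generalizing c with
  | nil => rfl
  | cons j l ih =>
    simp only [pvInner, List.foldl_cons]
    by_cases h : pvCell board i j == '*'
    · rw [if_pos h, show (List.foldl _ _ l = pvInner board i l _) from rfl, ih]
      simp
    · rw [if_neg h]
      exact ih c

theorem pvInner_getD (board : List String) (i : Nat) (l : List Nat) (c : List (List Nat)) (k : Nat)
    (hnd : l.Nodup) (hlt : ∀ j ∈ l, j < c.length) :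
    (pvInner board i l c).getD k [] =
      (c.getD k []) ++ (if k ∈ l ∧ pvCell board i k == '*' then [i] else []) := by
  induction l generalizing c with
  | nil => simp [pvInner]
  | cons j l ih =>
    have hndl : l.Nodup := hnd.of_cons
    have hjl : j ∉ l := by simp at hnd; exact hnd.1
    simp only [pvInner, List.foldl_cons]
    by_cases h : pvCell board i j == '*'
    · rw [if_pos h]
      have hjc : j < c.length := hlt j List.mem_cons_self
      rw [show (List.foldl _ _ l = pvInner board i l _) from rfl,
        ih _ hndl (by intro x hx; rw [List.length_set]; exact hlt x (List.mem_cons_of_mem _ hx))]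
      by_cases hk : k = j
      · subst hk
        have hset : (c.set k ((c.getD k []) ++ [i])).getD k [] = (c.getD k []) ++ [i] := by
          simp [List.getD, hjc]
        rw [hset, if_neg (by rintro ⟨hm, _⟩; exact hjl hm),
          if_pos ⟨List.mem_cons_self, h⟩, List.append_nil]
      · have hset : (c.set j ((c.getD j []) ++ [i])).getD k [] = c.getD k [] := by
          simp [List.getD, List.getElem?_set_ne (by omega : j ≠ k)]
        have hmem : (k ∈ j :: l) ↔ (k ∈ l) := by simp [hk]
        rw [hset, if_congr (and_congr_left' hmem) rfl rfl]
    · rw [if_neg h]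
      rw [show (List.foldl _ _ l = pvInner board i l _) from rfl,
        ih _ hndl (fun x hx => hlt x (List.mem_cons_of_mem _ hx))]
      by_cases hk : k = j
      · subst hk
        rw [if_neg (by rintro ⟨_, hc⟩; exact h hc), if_neg (by rintro ⟨_, hc⟩; exact h hc)]
      · have hmem : (k ∈ j :: l) ↔ (k ∈ l) := by simp [hk]
        rw [if_congr (and_congr_left' hmem) rfl rfl]

-- two lists of equal length agreeing on getD everywhere are equal
theorem pvExt_getD {α : Type} (d : α) (xs ys : List α) (hlen : xs.length = ys.length)
    (h : ∀ k, xs.getD k d = ys.getD k d) : xs = ys := by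
  apply List.ext_getElem hlen
  intro k h1 h2
  have := h k
  rwa [List.getD_eq_getElem _ _ h1, List.getD_eq_getElem _ _ h2] at this

theorem pvGetD_map_range {α : Type} (g : Nat → α) (n j : Nat) (d : α) (h : j < n) :
    ((List.range n).map g).getD j d = g j := by
  rw [List.getD_eq_getElem _ _ (by simpa using h)]
  simp

-- A's cols equal B's stars
theorem pvCols_eq_stars (board : List String) (n k : Nat) :
    (List.range k).foldl (fun c i => pvInner board i (List.range n) c) (List.replicate n []) =
      pvStars board k n := by
  induction k with
  | zero =>
    simp only [List.range_zero, List.foldl_nil, pvStars, List.filter_nil]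
    simp [List.map_const']
  | succ k ih =>
    rw [List.range_succ, List.foldl_append, List.foldl_cons, List.foldl_nil, ih]
    have hlen : (pvStars board k n).length = n := by simp [pvStars]
    apply pvExt_getD ([] : List Nat)
    · rw [pvInner_length, hlen]; simp [pvStars]
    · intro j
      by_cases hj : j < n
      · rw [pvInner_getD board k (List.range n) _ j (List.nodup_range)
            (by intro x hx; rw [hlen]; simpa using hx)]
        unfold pvStars
        rw [pvGetD_map_range _ _ _ _ hj, pvGetD_map_range _ _ _ _ hj]
        rw [List.range_succ, List.filter_append]
        by_cases hs : pvCell board k j == '*'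
        · simp [hs, hj]
        · simp [hs, hj]
      · rw [List.getD_eq_default, List.getD_eq_default]
        · simp [pvStars]; omega
        · rw [pvInner_length, hlen]; omega

-- folds over a list become folds over its index range
theorem pvFoldl_getD {α β : Type} (d : α) (f : β → α → β) (xs : List α) (init : β) :
    xs.foldl f init = (List.range xs.length).foldl (fun acc i => f acc (xs.getD i d)) init := by
  induction xs generalizing init with
  | nil => rfl
  | cons x xs ih =>
    rw [List.foldl_cons, ih (f init x)]
    simp only [List.length_cons, List.range_succ_eq_map, List.foldl_cons, List.foldl_map]
    rfl

-- '#'-count of column j among the first i rows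
def pvCnt (board : List String) (j i : Nat) : Int :=
  ((List.range i).countP (fun r => pvCell board r j == '#') : Int)

theorem pvPref_eq (board : List String) (n : Nat) :
    pvPref board n =
      (List.range (board.length + 1)).map (fun i => (List.range n).map (fun j => pvCnt board j i)) := by
  unfold pvPref
  rw [pvFoldl_getD ""]
  have : ∀ k, (List.range k).foldl
      (fun pref i => pref ++ [(List.range n).map (fun j =>
        (pref.getLastD []).getD j 0 + (if (board.getD i "").toList.getD j ' ' == '#' then 1 else 0))])
      [List.replicate n 0] =
      (List.range (k + 1)).map (fun i => (List.range n).map (fun j => pvCnt board j i)) := by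
    intro k
    induction k with
    | zero =>
      simp [pvCnt, List.map_const']
    | succ k ih =>
      rw [List.range_succ, List.foldl_append, ih, List.foldl_cons, List.foldl_nil]
      rw [show List.range (k + 1 + 1) = List.range (k + 1) ++ [k + 1] from List.range_succ]
      rw [List.map_append]
      congr 1
      simp only [List.map_cons, List.map_nil]
      congr 1
      have hlast : ((List.range (k + 1)).map (fun i => (List.range n).map (fun j => pvCnt board j i))).getLastD [] =
          (List.range n).map (fun j => pvCnt board j k) := by
        rw [List.range_succ, List.map_append]
        simp
      rw [hlast]
      apply List.map_congr_left
      intro j hj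
      rw [pvGetD_map_range _ _ _ _ (by simpa using hj)]
      unfold pvCnt
      rw [List.range_succ, List.countP_append]
      simp only [List.countP_cons, List.countP_nil]
      have : pvCell board k j = (board.getD k "").toList.getD j ' ' := rfl
      rw [← this]
      by_cases h : pvCell board k j == '#' <;> simp [h]
  exact this board.length

-- min/max of an ascending list
theorem pvFoldl_min_first (l : List Nat) : ∀ x, (∀ y ∈ l, x ≤ y) → l.foldl min x = x := by
  induction l with
  | nil => intro x _; rfl
  | cons y l ih =>
    intro x h
    rw [List.foldl_cons, min_eq_left (h y List.mem_cons_self)]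
    exact ih x (fun z hz => h z (List.mem_cons_of_mem _ hz))

theorem pvFoldl_max_last (l : List Nat) :
    ∀ x, l.Pairwise (· < ·) → (∀ y ∈ l, x ≤ y) → l.foldl max x = l.getLastD x := by
  induction l with
  | nil => intro x _ _; rfl
  | cons y l ih =>
    intro x hp h
    rw [List.foldl_cons, max_eq_right (h y List.mem_cons_self), List.getLastD_cons]
    exact ih y hp.of_cons (fun z hz => le_of_lt ((List.pairwise_cons.mp hp).1 z hz))

-- B's low fold: bounds and membership
theorem pvLowFold_ub (g : Nat → Option Nat) (l : List Nat) (acc : Int) :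
    acc ≤ l.foldl (fun acc j => match g j with | some b => max acc (b : Int) | none => acc) acc ∧
    ∀ j ∈ l, ∀ b, g j = some b →
      (b : Int) ≤ l.foldl (fun acc j => match g j with | some b => max acc (b : Int) | none => acc) acc := by
  induction l generalizing acc with
  | nil => simp
  | cons j l ih =>
    simp only [List.foldl_cons]
    cases hg : g j with
    | none =>
      refine ⟨(ih acc).1, ?_⟩
      intro j' hj' b hb
      rcases List.mem_cons.mp hj' with h' | h'
      · subst h'; rw [hg] at hb; cases hb
      · exact (ih acc).2 j' h' b hb
    | some b0 =>
      refine ⟨le_trans (le_max_left _ _) (ih (max acc (b0 : Int))).1, ?_⟩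
      intro j' hj' b hb
      rcases List.mem_cons.mp hj' with h' | h'
      · subst h'
        rw [hg] at hb
        have hbb : b0 = b := by injection hb
        subst hbb
        exact le_trans (le_max_right _ _) (ih (max acc (b0 : Int))).1
      · exact (ih (max acc (b0 : Int))).2 j' h' b hb

theorem pvLowFold_mem (g : Nat → Option Nat) (l : List Nat) (acc : Int) :
    l.foldl (fun acc j => match g j with | some b => max acc (b : Int) | none => acc) acc = acc ∨
    ∃ j ∈ l, ∃ b, g j = some b ∧
      l.foldl (fun acc j => match g j with | some b => max acc (b : Int) | none => acc) acc = (b : Int) := by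
  induction l generalizing acc with
  | nil => left; rfl
  | cons j l ih =>
    simp only [List.foldl_cons]
    cases hg : g j with
    | none =>
      rcases ih acc with h | ⟨j', hj', b, hb, he⟩
      · left; exact h
      · right; exact ⟨j', List.mem_cons_of_mem _ hj', b, hb, he⟩
    | some b0 =>
      rcases ih (max acc (b0 : Int)) with h | ⟨j', hj', b, hb, he⟩
      · rcases max_choice acc (b0 : Int) with hm | hm
        · left; rw [h, hm]
        · right; exact ⟨j, List.mem_cons_self, b0, hg, by rw [h, hm]⟩
      · right; exact ⟨j', List.mem_cons_of_mem _ hj', b, hb, he⟩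

-- counting '#' over [t, e) via prefix counts
theorem pvCount_range' (q : Nat → Bool) (t len : Nat) :
    ((List.range' t len).countP q : Int) =
      ((List.range (t + len)).countP q : Int) - ((List.range t).countP q : Int) := by
  have h : List.range (t + len) = List.range t ++ List.range' t len := by
    rw [List.range'_eq_map_range, List.range_add]
  rw [h, List.countP_append]
  push_cast
  ring

-- membership of getLastD in a nonempty list
theorem pvGetLastD_mem (l : List Nat) : ∀ d, l ≠ [] → l.getLastD d ∈ l := by
  induction l with
  | nil => intro d h; exact absurd rfl h
  | cons x t ih =>
    intro d _
    rw [List.getLastD_cons]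
    cases t with
    | nil => simp
    | cons y t' => exact List.mem_cons_of_mem _ (ih x (by simp))

-- main equivalence (the ports are total; they agree on every board)
theorem pvMain (board : List String) :
    clear_obstacles_puzzle board = clear_obstacles_puzzle_alt board := by
  simp only [clear_obstacles_puzzle, clear_obstacles_puzzle_alt]
  set m := board.length with hm
  set n := (board.headD "").length with hn
  have hbr : ∀ i, pvRowHasStar board n i = true ↔ ∃ j, j < n ∧ (pvCell board i j == '*') = true := by
    intro i
    simp [pvRowHasStar, List.any_eq_true, List.mem_range]
  rw [pvStepLoop_range board n m m, pvCols_eq_stars board n m]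
  have hlowrw : pvLow (pvStars board m n) =
      (List.range n).foldl (fun acc j =>
        match pvGmax (fun i => pvCell board i j == '*') m with
        | some b => max acc (b : Int)
        | none => acc) (-1) := by
    unfold pvLow pvStars
    rw [List.foldl_map]
    apply PySem.List.foldl_congr_mem'
    intro j _ acc
    rw [pvGmax_filter]
  rw [hlowrw]
  cases hM : pvGmax (fun i => pvRowHasStar board n i) m with
  | none =>
    have hnostar := (pvGmax_none _ m).mp hM
    have hlow : (List.range n).foldl (fun acc j =>
        match pvGmax (fun i => pvCell board i j == '*') m with
        | some b => max acc (b : Int)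
        | none => acc) (-1) = -1 := by
      rcases pvLowFold_mem (fun j => pvGmax (fun i => pvCell board i j == '*') m)
        (List.range n) (-1) with h | ⟨j, hj, b, hb, _⟩
      · exact h
      · obtain ⟨hpb, hbm⟩ := pvGmax_some_mem _ m b hb
        exact absurd ((hbr b).mpr ⟨j, List.mem_range.mp hj, hpb⟩) (hnostar b hbm)
    rw [hlow, if_pos (Or.inr rfl), if_pos (Or.inl (by norm_num))]
  | some i0 =>
    obtain ⟨hRH, hi0⟩ := pvGmax_some_mem _ m i0 hM
    have hub := pvGmax_some_ub _ m i0 hM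
    have hm1 : 0 < m := Nat.pos_of_ne_zero (by omega)
    -- the low fold computes i0
    have hg_le : ∀ j, j < n → ∀ b, pvGmax (fun i => pvCell board i j == '*') m = some b → b ≤ i0 := by
      intro j hj b hb
      obtain ⟨hpb, hbm⟩ := pvGmax_some_mem _ m b hb
      exact hub b hbm ((hbr b).mpr ⟨j, hj, hpb⟩)
    have hlow : (List.range n).foldl (fun acc j =>
        match pvGmax (fun i => pvCell board i j == '*') m with
        | some b => max acc (b : Int)
        | none => acc) (-1) = (i0 : Int) := by
      obtain ⟨j0, hj0, hpj0⟩ := (hbr i0).mp hRH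
      obtain ⟨b0, hb0⟩ : ∃ b0, pvGmax (fun i => pvCell board i j0 == '*') m = some b0 := by
        cases hgj : pvGmax (fun i => pvCell board i j0 == '*') m with
        | none => exact absurd hpj0 ((pvGmax_none _ m).mp hgj i0 hi0)
        | some b0 => exact ⟨b0, rfl⟩
      have hb0i0 : b0 = i0 := by
        have h1 : b0 ≤ i0 := hg_le j0 hj0 b0 hb0
        have h2 : i0 ≤ b0 := pvGmax_some_ub _ m b0 hb0 i0 hi0 hpj0
        omega
      subst hb0i0
      have hge : (b0 : Int) ≤ _ :=
        (pvLowFold_ub (fun j => pvGmax (fun i => pvCell board i j == '*') m)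
          (List.range n) (-1)).2 j0 (List.mem_range.mpr hj0) b0 hb0
      rcases pvLowFold_mem (fun j => pvGmax (fun i => pvCell board i j == '*') m)
        (List.range n) (-1) with h | ⟨j', hj', b', hb', he⟩
      · rw [h] at hge; omega
      · have : b' ≤ b0 := hg_le j' (List.mem_range.mp hj') b' hb'
        rw [he] at hge ⊢
        omega
    rw [hlow]
    by_cases hedge : i0 = m - 1
    · have hstep0 : m - 1 - i0 = 0 := by omega
      rw [if_pos (Or.inl hstep0), if_pos (Or.inr (by omega : (i0 : Int) = (m : Int) - 1))]
    · have hstepne : ¬ (m - 1 - i0 = 0 ∨ m - 1 - i0 = m) := by omega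
      have hlowne : ¬ ((i0 : Int) < 0 ∨ (i0 : Int) = (m : Int) - 1) := by
        rintro (h | h) <;> omega
      rw [if_neg hstepne, if_neg hlowne]
      have htonat : (i0 : Int).toNat = i0 := Int.toNat_natCast i0
      rw [htonat]
      apply PySem.List.foldl_congr_mem'
      intro p hp acc
      obtain ⟨k, hk, hpk⟩ := (PySem.List.mem_enumerate_iff _ _ _).mp hp
      have hkn : k < n := by simpa [pvStars] using hk
      have hpk' : p = ((k : Int), (List.range m).filter (fun i => pvCell board i k == '*')) := by
        rw [hpk]
        congr 1
        · omega
        · unfold pvStars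
          rw [List.getElem_map, List.getElem_range]
      subst hpk'
      simp only
      cases hcol : (List.range m).filter (fun i => pvCell board i k == '*') with
      | nil => simp
      | cons x t =>
        have hpw : (x :: t).Pairwise (· < ·) := by
          rw [← hcol]; exact List.pairwise_lt_range.filter _
        have hxle : ∀ y ∈ t, x ≤ y := fun y hy => le_of_lt ((List.pairwise_cons.mp hpw).1 y hy)
        have hbmem : (x :: t).getLastD 0 ∈ x :: t := pvGetLastD_mem (x :: t) 0 (by simp)
        have hbfacts : (pvCell board ((x :: t).getLastD 0) k == '*') = true ∧ (x :: t).getLastD 0 < m := by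
          have hmem : (x :: t).getLastD 0 ∈ (List.range m).filter (fun i => pvCell board i k == '*') := by
            rw [hcol]; exact hbmem
          rcases List.mem_filter.mp hmem with ⟨hbr', hbp⟩
          exact ⟨hbp, List.mem_range.mp hbr'⟩
        have hbi0 : (x :: t).getLastD 0 ≤ i0 :=
          hub _ hbfacts.2 ((hbr _).mpr ⟨k, hkn, hbfacts.1⟩)
        have hxb : x ≤ (x :: t).getLastD 0 := by
          rcases List.mem_cons.mp hbmem with h | h
          · omega
          · exact hxle _ h
        -- A's min/max of the ascending column are its head and last
        rw [PySem.List.min?_id_cons, PySem.List.max?_id_cons, pvFoldl_min_first t x hxle,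
          pvFoldl_max_last t x hpw.of_cons hxle, ← List.getLastD_cons (a := (0 : Nat))]
        simp only [Option.getD_some, ne_eq, reduceCtorEq, not_false_eq_true, if_pos,
          Int.toNat_natCast, List.headD_cons]
        -- A's rescan of [x, last+step] is a count
        refine (PySem.List.foldl_count_if (fun i => pvCell board i k == '#')
          (List.range' x ((x :: t).getLastD 0 + (m - 1 - i0) + 1 - x)) acc).trans ?_
        -- B's two prefix-table lookups
        have hprefAt : ∀ i, i < m + 1 →
            ((pvPref board n).getD i []).getD k 0 = pvCnt board k i := by
          intro i hi
          rw [pvPref_eq, pvGetD_map_range _ _ _ _ (by omega), pvGetD_map_range _ _ _ _ hkn]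
        rw [hprefAt _ (by omega), hprefAt _ (by omega)]
        have hcr := pvCount_range' (fun i => pvCell board i k == '#') x
          ((x :: t).getLastD 0 + (m - 1 - i0) + 1 - x)
        rw [show x + ((x :: t).getLastD 0 + (m - 1 - i0) + 1 - x) =
            (x :: t).getLastD 0 + (m - 1 - i0) + 1 from by omega] at hcr
        rw [hcr]
        simp only [pvCnt]

-- ===== VERDICT (by name: the statement is the Claim_ definition above) =====
theorem clear_obstacles_puzzle_spec : Claim_equal_clear_obstacles_puzzle := by
  intro board _ _
  unfold Spec_clear_obstacles_puzzle
  exact pvMain board
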